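-- pv_equiv track=rewrite | github.com/qqzhangyanhua/mainer-cli | src/tui/widgets.py | subsequence_gap
-- ===== SOURCE A (Python) =====
-- def subsequence_gap(needle: str, haystack: str) -> int:
--     """子序列匹配的间隔评分（越小越好）"""
--     index = -1
--     gaps = 0
--     for ch in needle:
--         next_index = haystack.find(ch, index + 1)
--         if next_index == -1:
--             return 10_000
--         gaps += next_index - index - 1
--         index = next_index
--     return gaps
-- ===== SOURCE B (Python) =====
-- def subsequence_gap(needle: str, haystack: str) -> int:
--     """子序列匹配的间隔评分（越小越好）"""
--     matched = 0
--     index = -1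
--     gaps = 0
--     for i, ch in enumerate(haystack):
--         if matched < len(needle) and ch == needle[matched]:
--             gaps += i - index - 1
--             index = i
--             matched += 1
--             if matched == len(needle):
--                 return gaps
--     return 10_000 if matched < len(needle) else gaps
-- ===== Notes on version B (the rewrite author's own statement) =====
-- stated objective: alternative
-- what changed: Replaces the per-needle-char str.find scans with one single left-to-right pass over the haystack that advances a pointer into the needle, accumulating gaps and returning early once the whole needle is matched.
import Mathlib
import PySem

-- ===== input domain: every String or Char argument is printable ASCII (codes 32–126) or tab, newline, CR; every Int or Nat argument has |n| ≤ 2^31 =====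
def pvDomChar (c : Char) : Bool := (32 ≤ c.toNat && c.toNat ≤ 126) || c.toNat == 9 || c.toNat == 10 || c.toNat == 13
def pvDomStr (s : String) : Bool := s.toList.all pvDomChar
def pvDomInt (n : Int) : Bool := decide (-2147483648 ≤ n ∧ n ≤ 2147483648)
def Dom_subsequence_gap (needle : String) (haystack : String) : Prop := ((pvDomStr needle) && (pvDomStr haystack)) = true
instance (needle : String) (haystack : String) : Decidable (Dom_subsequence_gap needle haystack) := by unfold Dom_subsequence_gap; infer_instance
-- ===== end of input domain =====

-- B replaces A's repeated haystack.find calls by a single explicit pass over the haystack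
-- with a pointer into the needle (objective: alternative decomposition, same cost).

-- ===== PORT A =====
-- loop "for ch in needle" with state (index, gaps); early return 10000 when find fails
def subGapLoopA (haystack : String) : List Char → Int → Int → Int
  | [], _, gaps => gaps
  | ch :: rest, index, gaps =>
    let next_index := PySem.Str.findFrom haystack (String.ofList [ch]) (index + 1) none
    if next_index = -1 then 10000
    else subGapLoopA haystack rest next_index (gaps + (next_index - index - 1))

def subsequence_gap (needle : String) (haystack : String) : Int :=
  subGapLoopA haystack needle.toList (-1) 0

-- ===== PORT B =====
-- loop "for i, ch in enumerate(haystack)" with state (matched, index, gaps);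
-- early return gaps when matched == len(needle), 10000 after the loop if matched < len(needle)
def subGapLoopB2 (nd : List Char) : List Char → Nat → Int → Int → Int → Int
  | [], matched, _, _, gaps => if matched < nd.length then 10000 else gaps
  | ch :: hs, matched, i, index, gaps =>
    match nd[matched]? with
    | some c =>
      if ch = c then
        let gaps' := gaps + (i - index - 1)
        if matched + 1 = nd.length then gaps'
        else subGapLoopB2 nd hs (matched + 1) (i + 1) i gaps'
      else subGapLoopB2 nd hs matched (i + 1) index gaps
    | none => subGapLoopB2 nd hs matched (i + 1) index gaps

def subsequence_gap_alt (needle : String) (haystack : String) : Int :=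
  subGapLoopB2 needle.toList haystack.toList 0 0 (-1) 0

-- ===== PRECONDITION & SPEC =====
def Spec_subsequence_gap (needle : String) (haystack : String) (out : Int) : Prop := out = subsequence_gap_alt needle haystack
instance (needle : String) (haystack : String) (out : Int) : Decidable (Spec_subsequence_gap needle haystack out) := by unfold Spec_subsequence_gap; infer_instance

-- ===== CLAIM (what is proved, stated in full; the proofs are below) =====
def Claim_equal_subsequence_gap : Prop := ∀ (needle : String) (haystack : String), Dom_subsequence_gap needle haystack → Spec_subsequence_gap needle haystack (subsequence_gap needle haystack)

-- ===== LEMMAS AND PROOFS =====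

-- proof-layer model of B: the still-unmatched needle suffix as an explicit list
def subGapLoopB : List Char → List Char → Int → Int → Int → Int
  | remaining, [], _, _, gaps => if remaining.isEmpty then gaps else 10000
  | remaining, ch :: hs, i, index, gaps =>
    match remaining with
    | c :: rest =>
      if ch = c then
        let gaps' := gaps + (i - index - 1)
        if rest.isEmpty then gaps'
        else subGapLoopB rest hs (i + 1) i gaps'
      else subGapLoopB (c :: rest) hs (i + 1) index gaps
    | [] => subGapLoopB [] hs (i + 1) index gaps

theorem loopB2_eq_loopB (nd : List Char) (hs : List Char) (matched : Nat)
    (i index gaps : Int) (hm : matched ≤ nd.length) :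
    subGapLoopB2 nd hs matched i index gaps
      = subGapLoopB (nd.drop matched) hs i index gaps := by
  induction hs generalizing matched i index gaps with
  | nil =>
    simp only [subGapLoopB2, subGapLoopB, List.isEmpty_iff, List.drop_eq_nil_iff]
    split <;> split <;> omega
  | cons ch t ih =>
    cases hg : nd[matched]? with
    | none =>
      have hlen : matched = nd.length := by
        have := List.getElem?_eq_none_iff.mp hg; omega
      have hdrop : nd.drop matched = [] := by
        rw [List.drop_eq_nil_iff]; omega
      simp only [subGapLoopB2, hg, hdrop, subGapLoopB]
      rw [ih matched (i + 1) index gaps hm, hdrop]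
    | some c =>
      have hsome := List.getElem?_eq_some_iff.mp hg
      have hlt : matched < nd.length := hsome.1
      have hdrop : nd.drop matched = c :: nd.drop (matched + 1) := by
        rw [List.drop_eq_getElem_cons hlt]
        congr 1
        exact hsome.2
      simp only [subGapLoopB2, hg, hdrop, subGapLoopB]
      by_cases hch : ch = c
      · simp only [hch, if_pos rfl]
        have hnil : nd.drop (matched + 1) = [] ↔ matched + 1 = nd.length := by
          rw [List.drop_eq_nil_iff]; omega
        by_cases hfin : matched + 1 = nd.length
        · have h0 : (nd.drop (matched + 1)).isEmpty = true := by
            simp [List.isEmpty_iff, hnil, hfin]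
          simp [hfin, h0]
        · have h0 : (nd.drop (matched + 1)).isEmpty = false := by
            simp only [List.isEmpty_eq_false_iff, ne_eq, hnil]; exact hfin
          simp only [hfin, if_false, h0, Bool.false_eq_true]
          exact ih (matched + 1) (i + 1) i _ (by omega)
      · simp only [hch, if_false]
        rw [ih matched (i + 1) index gaps hm, hdrop]

-- relative index of the first occurrence of c
def seekC (c : Char) : List Char → Option Nat
  | [] => none
  | h :: t => if h = c then some 0 else (seekC c t).map (· + 1)

theorem seekC_lt_length (c : Char) (l : List Char) (r : Nat) (h : seekC c l = some r) :
    r < l.length := by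
  induction l generalizing r with
  | nil => simp [seekC] at h
  | cons a t ih =>
    simp only [seekC] at h
    split at h
    · simp only [Option.some.injEq] at h; simp; omega
    · rcases Option.map_eq_some_iff.mp h with ⟨r', hr', rfl⟩
      have := ih r' hr'
      simp; omega

theorem find_go_char (c : Char) (l : List Char) (k : Nat) :
    PySem.Chars.find.go [c] l k =
      match seekC c l with
      | none => -1
      | some r => ((k : Int) + r) := by
  induction l generalizing k with
  | nil => simp [PySem.Chars.find.go, seekC]
  | cons h t ih =>
    have hgo : PySem.Chars.find.go [c] (h :: t) k =
        if [c].isPrefixOf (h :: t) then (k : Int) else PySem.Chars.find.go [c] t (k + 1) := rfl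
    rw [hgo, ih (k + 1)]
    by_cases hc : h = c
    · simp [List.isPrefixOf, seekC, hc]
    · have : (c == h) = false := by simp [Ne.symm hc]
      simp only [List.isPrefixOf, this, Bool.false_and, if_false, seekC, hc, if_false]
      cases hs : seekC c t with
      | none => simp
      | some r => simp; push_cast; ring

theorem find_char (c : Char) (l : List Char) :
    PySem.Chars.find l [c] =
      match seekC c l with
      | none => -1
      | some r => (r : Int) := by
  have := find_go_char c l 0
  simpa [PySem.Chars.find] using this

theorem loopB_nil (hs : List Char) (i index gaps : Int) :
    subGapLoopB [] hs i index gaps = gaps := by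
  induction hs generalizing i with
  | nil => simp [subGapLoopB]
  | cons h t ih => simpa [subGapLoopB] using ih (i + 1)

theorem loopB_seek (hs : List Char) (c : Char) (rest : List Char) (j index gaps : Int) :
    subGapLoopB (c :: rest) hs j index gaps =
      match seekC c hs with
      | none => 10000
      | some r =>
          if rest.isEmpty then gaps + ((j + r) - index - 1)
          else subGapLoopB rest (hs.drop (r + 1)) ((j + r) + 1) (j + r) (gaps + ((j + r) - index - 1)) := by
  induction hs generalizing j gaps with
  | nil => simp [subGapLoopB, seekC]
  | cons h t ih =>
    by_cases hc : h = c
    · subst hc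
      simp only [subGapLoopB, seekC]
      split <;> simp_all
    · have h1 : subGapLoopB (c :: rest) (h :: t) j index gaps
          = subGapLoopB (c :: rest) t (j + 1) index gaps := by
        simp [subGapLoopB, hc]
      rw [h1, ih (j + 1) gaps]
      simp only [seekC, hc, if_false]
      cases hs : seekC c t with
      | none => simp
      | some r =>
        simp only [Option.map_some]
        have e : t.drop (r + 1) = (h :: t).drop (r + 1 + 1) := by
          rw [List.drop_succ_cons]
        rw [e]
        split <;> push_cast <;> ring_nf

theorem findFrom_char (haystack : String) (c : Char) (k : Nat) (hk : k ≤ haystack.toList.length) :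
    PySem.Str.findFrom haystack (String.ofList [c]) (k : Int) none =
      match seekC c (haystack.toList.drop k) with
      | none => -1
      | some r => ((k : Int) + r) := by
  have h1 := PySem.Chars.findFrom_natCast haystack.toList [c] k hk
  simp only [PySem.Str.findFrom_eq, String.toList_ofList] at *
  rw [h1, find_char]
  cases hs : seekC c (haystack.toList.drop k) with
  | none => simp
  | some r => simp

theorem mainLemma (haystack : String) (rem : List Char) (k : Nat) (gaps : Int)
    (hk : k ≤ haystack.toList.length) :
    subGapLoopB rem (haystack.toList.drop k) (k : Int) ((k : Int) - 1) gaps =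
      subGapLoopA haystack rem ((k : Int) - 1) gaps := by
  induction rem generalizing k gaps with
  | nil => simp [subGapLoopA, loopB_nil]
  | cons c rest ih =>
    rw [loopB_seek]
    show _ = subGapLoopA haystack (c :: rest) ((k : Int) - 1) gaps
    have hstep : ((k : Int) - 1 + 1) = (k : Int) := by ring
    simp only [subGapLoopA, hstep, findFrom_char haystack c k hk]
    cases hs : seekC c (haystack.toList.drop k) with
    | none => simp
    | some r =>
      have hr : r < haystack.toList.length - k := by
        have := seekC_lt_length c _ _ hs
        simpa using this
      have hne : ((k : Int) + r) ≠ -1 := by omega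
      simp only [hne, if_false]
      by_cases hrest : rest.isEmpty
      · simp only [hrest, if_true]
        have : rest = [] := List.isEmpty_iff.mp hrest
        subst this
        simp [subGapLoopA]
      · simp only [hrest, Bool.false_eq_true, if_false]
        have hk' : k + r + 1 ≤ haystack.toList.length := by omega
        have h2 := ih (k + r + 1) (gaps + (((k : Int) + r) - ((k : Int) - 1) - 1)) hk'
        rw [List.drop_drop]
        have e2 : k + (r + 1) = k + r + 1 := by omega
        rw [e2]
        push_cast at h2
        convert h2 using 2 <;> ring

-- ===== VERDICT (by name: the statement is the Claim_ definition above) =====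
theorem subsequence_gap_spec : Claim_equal_subsequence_gap := by
  intro needle haystack _
  unfold Spec_subsequence_gap subsequence_gap subsequence_gap_alt
  rw [loopB2_eq_loopB needle.toList haystack.toList 0 0 (-1) 0 (by omega)]
  have := mainLemma haystack needle.toList 0 0 (by omega)
  simpa using this.symm
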